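-- pv_equiv track=rewrite | github.com/selmling/Natural-Statistics-Cross-linguistic-Public-Repo | analysis/data_proc/analytic_proc.py | determine_uniqueness
-- ===== SOURCE A (Python) =====
-- def determine_uniqueness(utterance, word_set):
--     split = utterance.split()
--     unique_count = 0
--     for word in split:
--         if word not in word_set:
--             unique_count += 1
--         word_set.add(word)
--     return unique_count, word_set
-- ===== SOURCE B (Python) =====
-- def determine_uniqueness(utterance, word_set):
--     before = len(word_set)
--     word_set.update(utterance.split())
--     return len(word_set) - before, word_set
-- ===== Notes on version B (the rewrite author's own statement) =====
-- stated objective: simpler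
-- what changed: Instead of testing each word for membership and keeping a running counter, B records the set's cardinality, bulk-updates it with all the words, and obtains the novel-word count as the growth in cardinality (len after minus len before) - no membership tests or counter at all.
import Mathlib
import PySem

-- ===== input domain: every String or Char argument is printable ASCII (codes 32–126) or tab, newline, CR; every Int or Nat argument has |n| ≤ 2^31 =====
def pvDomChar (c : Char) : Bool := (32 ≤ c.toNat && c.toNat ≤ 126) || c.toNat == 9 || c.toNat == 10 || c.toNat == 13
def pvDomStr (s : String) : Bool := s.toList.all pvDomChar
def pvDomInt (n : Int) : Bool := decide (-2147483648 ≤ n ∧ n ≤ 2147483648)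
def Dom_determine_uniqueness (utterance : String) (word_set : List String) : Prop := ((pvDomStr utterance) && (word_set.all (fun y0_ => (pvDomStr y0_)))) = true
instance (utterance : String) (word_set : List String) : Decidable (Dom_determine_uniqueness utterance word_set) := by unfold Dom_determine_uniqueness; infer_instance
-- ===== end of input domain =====

-- B replaces A's per-word membership loop and counter with a bulk set.update, recovering the
-- novel-word count as the set's growth in cardinality (objective: simpler). Both mutate/extend
-- the passed-in set in Python; equivalence here is about the returned (count, set) pair.


-- ===== PORT A =====
def determine_uniqueness (utterance : String) (word_set : List String) : Int × List String :=
  let split := PySem.Str.split₀ utterance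
  split.foldl
    (fun acc word =>
      (acc.1 + (if PySem.Set.contains acc.2 word then (0 : Int) else 1),
       PySem.Set.add acc.2 word))
    ((0 : Int), word_set)

-- ===== PORT B =====
def determine_uniqueness_alt (utterance : String) (word_set : List String) : Int × List String :=
  let before : Int := PySem.Set.len word_set
  let updated := PySem.Set.update word_set (PySem.Str.split₀ utterance)
  (PySem.Set.len updated - before, updated)

-- ===== PRECONDITION & SPEC =====
def Spec_determine_uniqueness (utterance : String) (word_set : List String) (out : Int × List String) : Prop := out = determine_uniqueness_alt utterance word_set
instance (utterance : String) (word_set : List String) (out : Int × List String) : Decidable (Spec_determine_uniqueness utterance word_set out) := by unfold Spec_determine_uniqueness; infer_instance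

-- ===== CLAIM (what is proved, stated in full; the proofs are below) =====
def Claim_equal_determine_uniqueness : Prop := ∀ (utterance : String) (word_set : List String), Dom_determine_uniqueness utterance word_set → Spec_determine_uniqueness utterance word_set (determine_uniqueness utterance word_set)

-- ===== LEMMAS AND PROOFS =====

-- the new-word count of A's loop is the cardinality of (set of words) - (seen set)
theorem du_foldl_eq (l : List String) (c : Int) (s : List String) :
    l.foldl
      (fun acc word =>
        (acc.1 + (if PySem.Set.contains acc.2 word then (0 : Int) else 1),
         PySem.Set.add acc.2 word))
      (c, s)
    = (c + PySem.Set.len (PySem.Set.diff (PySem.Set.ofList l) s), PySem.Set.update s l) := by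
  induction l generalizing c s with
  | nil => simp [PySem.Set.ofList, PySem.Set.diff, PySem.Set.len, PySem.Set.update]
  | cons x l ih =>
    simp only [List.foldl_cons, ih, PySem.Set.update_cons, Prod.mk.injEq, and_true]
    rw [PySem.Set.ofList_cons]
    by_cases hx : PySem.Set.contains s x = true
    · have hadd : PySem.Set.add s x = s :=
        PySem.Set.add_of_mem ((PySem.Set.contains_iff s x).mp hx)
      rw [hadd]
      simp only [hx, if_true, add_zero]
      have hfil : (PySem.Set.discard (PySem.Set.ofList l) x).filter
            (fun y => !(PySem.Set.contains s y))
          = (PySem.Set.ofList l).filter (fun y => !(PySem.Set.contains s y)) := by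
        show ((PySem.Set.ofList l).filter (fun y => !(y == x))).filter
              (fun y => !(PySem.Set.contains s y))
            = (PySem.Set.ofList l).filter (fun y => !(PySem.Set.contains s y))
        rw [List.filter_comm]
        apply List.filter_eq_self.mpr
        intro y hy
        have hy' := List.of_mem_filter hy
        simp only [Bool.not_eq_eq_eq_not, Bool.not_true, beq_eq_false_iff_ne] at hy' ⊢
        intro he
        subst he
        simp only [PySem.Set.contains_eq_listContains] at hx hy'
        exact absurd hx (by simpa using hy')
      show c + PySem.Set.len (PySem.Set.diff (PySem.Set.ofList l) s)
          = c + PySem.Set.len (PySem.Set.diff (x :: PySem.Set.discard (PySem.Set.ofList l) x) s)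
      simp only [PySem.Set.diff, PySem.Set.len, List.filter_cons, hx, Bool.not_true]
      rw [show (PySem.Set.discard (PySem.Set.ofList l) x).filter
            (fun y => !(PySem.Set.contains s y))
          = (PySem.Set.ofList l).filter (fun y => !(PySem.Set.contains s y)) from hfil]
      simp
    · have hadd : PySem.Set.add s x = s ++ [x] := by
        have : ¬ x ∈ s := fun hm => hx ((PySem.Set.contains_iff s x).mpr hm)
        exact PySem.Set.add_of_not_mem this
      rw [hadd]
      simp only [hx]
      show c + 1 + PySem.Set.len (PySem.Set.diff (PySem.Set.ofList l) (s ++ [x]))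
          = c + PySem.Set.len (PySem.Set.diff (x :: PySem.Set.discard (PySem.Set.ofList l) x) s)
      simp only [PySem.Set.diff, PySem.Set.len, List.filter_cons, hx, Bool.not_false, if_true]
      have hfil : (PySem.Set.ofList l).filter (fun y => !(PySem.Set.contains (s ++ [x]) y))
          = (PySem.Set.discard (PySem.Set.ofList l) x).filter
              (fun y => !(PySem.Set.contains s y)) := by
        show (PySem.Set.ofList l).filter (fun y => !(PySem.Set.contains (s ++ [x]) y))
            = ((PySem.Set.ofList l).filter (fun y => !(y == x))).filter
                (fun y => !(PySem.Set.contains s y))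
        rw [List.filter_comm, List.filter_filter]
        apply List.filter_congr
        intro y _
        simp only [PySem.Set.contains_eq_listContains, List.contains_append,
          List.contains_cons, List.contains_nil, Bool.or_false, Bool.not_or,
          Bool.and_comm, BEq.comm]
      rw [hfil]
      simp only [List.length_cons, Bool.not_eq_true] at *
      push_cast
      ring

-- the bulk update grows the set by exactly the cardinality of (set of words) - (seen set)
theorem du_len_update (s l : List String) :
    PySem.Set.len (PySem.Set.update s l)
      = PySem.Set.len s + PySem.Set.len (PySem.Set.diff (PySem.Set.ofList l) s) := by
  rw [PySem.Set.update_eq_append_filter]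
  simp [PySem.Set.len, PySem.Set.diff]

-- ===== VERDICT (by name: the statement is the Claim_ definition above) =====
theorem determine_uniqueness_spec : Claim_equal_determine_uniqueness := by
  intro utterance word_set _
  show determine_uniqueness utterance word_set = determine_uniqueness_alt utterance word_set
  unfold determine_uniqueness determine_uniqueness_alt
  show _ = (PySem.Set.len (PySem.Set.update word_set (PySem.Str.split₀ utterance))
      - PySem.Set.len word_set, PySem.Set.update word_set (PySem.Str.split₀ utterance))
  rw [du_foldl_eq, du_len_update, zero_add]
  simp
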